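-- pv_equiv track=rewrite | github.com/Ch0sen1/Leetcode-python | 1023-camelcase-matching/1023-camelcase-matching.py | check
-- ===== SOURCE A (Python) =====
-- def check(word, pattern):
--     j = 0
--     for i, c in enumerate(word):
--         if j < len(pattern) and c == pattern[j]:
--             j += 1
--         elif c.isupper():
--             return False
--
--     return j == len(pattern)
-- ===== SOURCE B (Python) =====
-- def check(word, pattern):
--     m = len(pattern)
--     # NFA-style simulation: the set of pattern positions reachable after the
--     # word prefix read so far ("pattern[:j] consumed" for each j in the set).
--     reach = {0}
--     for c in word:
--         new = {j + 1 for j in reach if j < m and pattern[j] == c}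
--         if not c.isupper():
--             new |= reach
--         if not new:
--             return False
--         reach = new
--     return m in reach
-- ===== Notes on version B (the rewrite author's own statement) =====
-- stated objective: alternative
-- what changed: Replaces A's greedy single pointer into the pattern by an NFA-style simulation that carries the whole set of reachable pattern positions, updating it per word character (set comprehension + union, early False when the set empties) and finally testing membership of len(pattern).
import Mathlib
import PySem

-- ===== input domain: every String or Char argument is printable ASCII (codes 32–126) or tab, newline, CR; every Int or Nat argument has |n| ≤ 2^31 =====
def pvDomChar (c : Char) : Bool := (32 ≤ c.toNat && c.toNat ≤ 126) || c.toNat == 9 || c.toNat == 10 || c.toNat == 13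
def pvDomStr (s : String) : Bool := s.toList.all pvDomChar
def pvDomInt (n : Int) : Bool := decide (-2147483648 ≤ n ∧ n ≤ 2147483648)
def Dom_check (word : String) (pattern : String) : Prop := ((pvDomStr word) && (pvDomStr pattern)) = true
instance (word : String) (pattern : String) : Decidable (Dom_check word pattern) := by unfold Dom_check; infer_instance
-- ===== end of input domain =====

-- B replaces A's greedy pattern pointer by an NFA-style simulation carrying the whole
-- set of reachable pattern positions (alternative algorithm).

-- ===== PORT A =====
-- A's loop over word with index j into pattern; 'j < len(pattern) and c == pattern[j]'
-- is the single test 'pat[j]? == some c' (out-of-range lookup gives none).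
def checkA (pat : List Char) : List Char → Nat → Bool
  | [], j => j == pat.length
  | c :: rest, j =>
    if pat[j]? == some c then checkA pat rest (j + 1)
    else if PySem.Chars.isupper c then false
    else checkA pat rest j

def check (word : String) (pattern : String) : Bool :=
  checkA pattern.toList word.toList 0

-- ===== PORT B =====
-- one step of B's loop body: the set comprehension '{j+1 for j in reach if j < m and
-- pattern[j] == c}' (pattern[j] is always in range there, so getD is exact; the set
-- built from it is order-insensitive) then '|= reach' unless c is uppercase.
def stepS (pat : List Char) (reach : PySem.Set Nat) (c : Char) : PySem.Set Nat :=
  let base : PySem.Set Nat := PySem.Set.ofList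
    ((reach.filter (fun j => decide (j < pat.length) && (pat.getD j ' ' == c))).map
      (fun j => j + 1))
  if PySem.Chars.isupper c then base else PySem.Set.union base reach

-- B's word loop: update the set, return False early when it empties
def loopS (pat : List Char) : List Char → PySem.Set Nat → Bool
  | [], reach => PySem.Set.contains reach pat.length
  | c :: rest, reach =>
    let r := stepS pat reach c
    if r.isEmpty then false else loopS pat rest r

def check_alt (word : String) (pattern : String) : Bool :=
  loopS pattern.toList word.toList (PySem.Set.ofList [0])

-- ===== PRECONDITION & SPEC =====
def Spec_check (word : String) (pattern : String) (out : Bool) : Prop := out = check_alt word pattern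
instance (word : String) (pattern : String) (out : Bool) : Decidable (Spec_check word pattern out) := by unfold Spec_check; infer_instance

-- ===== CLAIM (what is proved, stated in full; the proofs are below) =====
def Claim_equal_check : Prop := ∀ (word : String) (pattern : String), Dom_check word pattern → Spec_check word pattern (check word pattern)

-- ===== LEMMAS AND PROOFS =====

-- proof-only accessor for a pattern character (fixed normal form)
def gC (l : List Char) (k : Nat) : Char := (l[k]?).getD ' '

-- membership characterisation of one simulation step
theorem mem_stepS (pat : List Char) (reach : PySem.Set Nat) (c : Char) (k : Nat) :
    k ∈ stepS pat reach c ↔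
      ((∃ j, j ∈ reach ∧ j < pat.length ∧ gC pat j = c ∧ k = j + 1) ∨
       (PySem.Chars.isupper c = false ∧ k ∈ reach)) := by
  have hbase : ∀ x : Nat, x ∈ ((reach.filter
        (fun j => decide (j < pat.length) && (pat.getD j ' ' == c))).map (fun j => j + 1)) ↔
      (∃ j, j ∈ reach ∧ j < pat.length ∧ gC pat j = c ∧ x = j + 1) := by
    intro x
    rw [List.mem_map]
    constructor
    · rintro ⟨j, hj, rfl⟩
      rw [List.mem_filter] at hj
      obtain ⟨hmem, hcond⟩ := hj
      simp only [Bool.and_eq_true, decide_eq_true_eq, beq_iff_eq] at hcond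
      exact ⟨j, hmem, hcond.1, by simpa [gC, List.getD_eq_getElem?_getD] using hcond.2, rfl⟩
    · rintro ⟨j, hmem, hlt, hc, rfl⟩
      refine ⟨j, List.mem_filter.mpr ⟨hmem, ?_⟩, rfl⟩
      simp only [Bool.and_eq_true, decide_eq_true_eq, beq_iff_eq]
      exact ⟨hlt, by simpa [gC, List.getD_eq_getElem?_getD] using hc⟩
  unfold stepS
  by_cases hup : PySem.Chars.isupper c
  · simp only [hup, if_true, PySem.Set.mem_ofList, hbase, Bool.true_eq_false, false_and,
      or_false]
  · have hup' : PySem.Chars.isupper c = false := by simpa using hup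
    simp only [hup', Bool.false_eq_true, if_false, PySem.Set.mem_union, PySem.Set.mem_ofList,
      hbase, true_and]

-- step on an interval [lo..j], matching uppercase char: new set {j+1}
theorem step_match_upper (pat : List Char) (reach : PySem.Set Nat) (c : Char) (lo j : Nat)
    (hj : j < pat.length) (hlo : lo ≤ j)
    (hreach : ∀ k, k ∈ reach ↔ lo ≤ k ∧ k ≤ j)
    (hlow : ∀ k, lo ≤ k → k < j → PySem.Chars.isupper (gC pat k) = false)
    (hup : PySem.Chars.isupper c = true) (hpj : gC pat j = c) :
    ∀ t, t ∈ stepS pat reach c ↔ (j + 1 ≤ t ∧ t ≤ j + 1) := by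
  intro t
  rw [mem_stepS]
  constructor
  · rintro (⟨j0, hmem, hlt, hc, rfl⟩ | ⟨hfalse, _⟩)
    · rw [hreach] at hmem
      rcases Nat.lt_or_ge j0 j with h3 | h3
      · have := hlow j0 hmem.1 h3
        rw [hc] at this; rw [this] at hup; exact absurd hup (by simp)
      · omega
    · rw [hfalse] at hup; exact absurd hup (by simp)
  · rintro ⟨h1, h2⟩
    have ht : t = j + 1 := by omega
    subst ht
    exact Or.inl ⟨j, (hreach j).mpr ⟨hlo, le_rfl⟩, hj, hpj, rfl⟩

-- step on an interval, matching non-uppercase char: interval grows to [lo..j+1]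
theorem step_match_lower (pat : List Char) (reach : PySem.Set Nat) (c : Char) (lo j : Nat)
    (hj : j < pat.length) (_hlo : lo ≤ j)
    (hreach : ∀ k, k ∈ reach ↔ lo ≤ k ∧ k ≤ j)
    (hup : PySem.Chars.isupper c = false) (hpj : gC pat j = c) :
    ∀ t, t ∈ stepS pat reach c ↔ (lo ≤ t ∧ t ≤ j + 1) := by
  intro t
  rw [mem_stepS]
  constructor
  · rintro (⟨j0, hmem, _, _, rfl⟩ | ⟨_, hmem⟩) <;> rw [hreach] at hmem <;> omega
  · rintro ⟨h1, h2⟩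
    rcases Nat.lt_or_ge t (j + 1) with h3 | h3
    · exact Or.inr ⟨hup, (hreach t).mpr ⟨h1, by omega⟩⟩
    · have ht : t = j + 1 := by omega
      subst ht
      exact Or.inl ⟨j, (hreach j).mpr ⟨by omega, le_rfl⟩, hj, hpj, rfl⟩

-- step on an interval, non-matching uppercase char: the set empties
theorem step_nomatch_upper (pat : List Char) (reach : PySem.Set Nat) (c : Char) (lo j : Nat)
    (_hj : j ≤ pat.length) (_hlo : lo ≤ j)
    (hreach : ∀ k, k ∈ reach ↔ lo ≤ k ∧ k ≤ j)
    (hlow : ∀ k, lo ≤ k → k < j → PySem.Chars.isupper (gC pat k) = false)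
    (hup : PySem.Chars.isupper c = true)
    (hnm : ∀ _ : j < pat.length, gC pat j ≠ c) :
    ∀ t, ¬ t ∈ stepS pat reach c := by
  intro t h
  rw [mem_stepS] at h
  rcases h with ⟨j0, hmem, hlt, hc, rfl⟩ | ⟨hfalse, _⟩
  · rw [hreach] at hmem
    rcases Nat.lt_or_ge j0 j with h3 | h3
    · have := hlow j0 hmem.1 h3
      rw [hc] at this; rw [this] at hup; exact absurd hup (by simp)
    · have hj0 : j0 = j := by omega
      subst hj0
      exact hnm hlt hc
  · rw [hfalse] at hup; exact absurd hup (by simp)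

-- step on an interval, non-matching non-uppercase char: interval unchanged
theorem step_nomatch_lower (pat : List Char) (reach : PySem.Set Nat) (c : Char) (lo j : Nat)
    (_hj : j ≤ pat.length) (_hlo : lo ≤ j)
    (hreach : ∀ k, k ∈ reach ↔ lo ≤ k ∧ k ≤ j)
    (hup : PySem.Chars.isupper c = false)
    (hnm : ∀ _ : j < pat.length, gC pat j ≠ c) :
    ∀ t, t ∈ stepS pat reach c ↔ (lo ≤ t ∧ t ≤ j) := by
  intro t
  rw [mem_stepS]
  constructor
  · rintro (⟨j0, hmem, hlt, hc, rfl⟩ | ⟨_, hmem⟩)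
    · rw [hreach] at hmem
      rcases Nat.lt_or_ge j0 j with h3 | h3
      · omega
      · have hj0 : j0 = j := by omega
        subst hj0
        exact absurd hc (hnm hlt)
    · rw [hreach] at hmem; exact hmem
  · rintro ⟨h1, h2⟩
    exact Or.inr ⟨hup, (hreach t).mpr ⟨h1, h2⟩⟩

-- a set with a member is not isEmpty; a set with no members is
theorem isEmpty_false_of_mem {α : Type} (s : List α) (x : α) (h : x ∈ s) :
    s.isEmpty = false := by
  cases s with
  | nil => exact absurd h (by simp)
  | cons a t => rfl

theorem isEmpty_true_of_forall_not_mem {α : Type} (s : List α) (h : ∀ x, ¬ x ∈ s) :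
    s.isEmpty = true := by
  cases s with
  | nil => rfl
  | cons a t => exact absurd (List.mem_cons_self) (h a)

-- main invariant: B's reachable set is exactly the interval [lo..j], where j is A's
-- greedy pointer and every pattern position in [lo..j) is not uppercase
theorem checkA_eq_loopS (pat : List Char) (w : List Char) :
    ∀ (j lo : Nat) (reach : PySem.Set Nat), j ≤ pat.length → lo ≤ j →
      (∀ k, k ∈ reach ↔ lo ≤ k ∧ k ≤ j) →
      (∀ k, lo ≤ k → k < j → PySem.Chars.isupper (gC pat k) = false) →
      checkA pat w j = loopS pat w reach := by
  induction w with
  | nil =>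
    intro j lo reach hj hlo hreach _
    show (j == pat.length) = PySem.Set.contains reach pat.length
    rw [Bool.eq_iff_iff, beq_iff_eq, PySem.Set.contains_iff, hreach]
    omega
  | cons c rest ih =>
    intro j lo reach hj hlo hreach hlow
    simp only [checkA, loopS]
    by_cases hmatch : pat[j]? = some c
    · have hjlt : j < pat.length := by
        by_contra h
        rw [List.getElem?_eq_none (by omega)] at hmatch
        exact absurd hmatch (by simp)
      have hpj : gC pat j = c := by rw [gC, hmatch]; rfl
      rw [if_pos (by simp [hmatch])]
      by_cases hup : PySem.Chars.isupper c
      · have hstep := step_match_upper pat reach c lo j hjlt hlo hreach hlow hup hpj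
        rw [if_neg (by rw [isEmpty_false_of_mem _ (j + 1)
              ((hstep (j + 1)).mpr ⟨le_rfl, le_rfl⟩)]; simp)]
        exact ih (j + 1) (j + 1) _ (by omega) le_rfl hstep (by omega)
      · have hup' : PySem.Chars.isupper c = false := by simpa using hup
        have hstep := step_match_lower pat reach c lo j hjlt hlo hreach hup' hpj
        rw [if_neg (by rw [isEmpty_false_of_mem _ lo
              ((hstep lo).mpr ⟨le_rfl, by omega⟩)]; simp)]
        refine ih (j + 1) lo _ (by omega) (by omega) hstep ?_
        intro k hk1 hk2
        rcases Nat.lt_or_ge k j with h | h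
        · exact hlow k hk1 h
        · have : k = j := by omega
          subst this; rw [hpj]; exact hup'
    · have hnm : ∀ _ : j < pat.length, gC pat j ≠ c := by
        intro h he
        apply hmatch
        rw [List.getElem?_eq_getElem h]
        rw [gC, List.getElem?_eq_getElem h] at he
        simpa using he
      rw [if_neg (by simpa using hmatch)]
      by_cases hup : PySem.Chars.isupper c
      · rw [if_pos hup]
        have hstep := step_nomatch_upper pat reach c lo j hj hlo hreach hlow hup hnm
        rw [if_pos (isEmpty_true_of_forall_not_mem _ hstep)]
      · have hup' : PySem.Chars.isupper c = false := by simpa using hup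
        rw [if_neg hup]
        have hstep := step_nomatch_lower pat reach c lo j hj hlo hreach hup' hnm
        rw [if_neg (by rw [isEmpty_false_of_mem _ lo ((hstep lo).mpr ⟨le_rfl, hlo⟩)]; simp)]
        exact ih j lo _ hj hlo hstep hlow

-- ===== VERDICT (by name: the statement is the Claim_ definition above) =====
theorem check_spec : Claim_equal_check := by
  intro word pattern _
  unfold Spec_check check check_alt
  refine checkA_eq_loopS pattern.toList word.toList 0 0 _ (by omega) le_rfl ?_ (by omega)
  intro k
  rw [PySem.Set.mem_ofList]
  simp only [List.mem_singleton]
  omega
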